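-- pv_equiv track=rewrite | github.com/Derling/algorithms | python/cannibal_numbers.py | cannibal_number
-- ===== SOURCE A (Python) =====
-- def cannibal_number(array, query):
--     ''' recursive solution '''
--     def recursion(array, query):
--         if not array: # empty array
--             return 0
--         elif len(array) == 1: # one element in array
--             return 1 if array[0] >= query else 0
--         else: # check highest integer in array
--             if array[-1] >= query:
--                 # found a strong enough cannibal, remove it and do recursion
--                 return 1 + cannibal_number(array[:-1], query)
--             else:
--                 # cannibal too weak, make it eat the smallest integer
--                 array[-1] = array[-1] + 1
--                 array.pop(0)
--                 return 0 + cannibal_number(array, query)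
--     return recursion(sorted(array), query)
-- ===== SOURCE B (Python) =====
-- def cannibal_number(array, query):
--     # Sort once and walk the sorted list with two pointers: the current top
--     # eats from the bottom (+1 each) until it reaches the query, then is counted.
--     s = sorted(array)
--     if not s:
--         return 0
--     lo, hi = 0, len(s) - 1
--     cur = s[hi]
--     count = 0
--     while lo < hi:
--         if cur >= query:
--             count += 1
--             hi -= 1
--             cur = s[hi]
--         else:
--             cur += 1
--             lo += 1
--     return count + (1 if cur >= query else 0)
-- ===== Notes on version B (the rewrite author's own statement) =====
-- stated objective: faster
-- what changed: Replaced the re-sort-on-every-recursive-step simulation with a single sort followed by one two-pointer pass that keeps the current top's accumulated strength in a variable.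
import Mathlib
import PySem

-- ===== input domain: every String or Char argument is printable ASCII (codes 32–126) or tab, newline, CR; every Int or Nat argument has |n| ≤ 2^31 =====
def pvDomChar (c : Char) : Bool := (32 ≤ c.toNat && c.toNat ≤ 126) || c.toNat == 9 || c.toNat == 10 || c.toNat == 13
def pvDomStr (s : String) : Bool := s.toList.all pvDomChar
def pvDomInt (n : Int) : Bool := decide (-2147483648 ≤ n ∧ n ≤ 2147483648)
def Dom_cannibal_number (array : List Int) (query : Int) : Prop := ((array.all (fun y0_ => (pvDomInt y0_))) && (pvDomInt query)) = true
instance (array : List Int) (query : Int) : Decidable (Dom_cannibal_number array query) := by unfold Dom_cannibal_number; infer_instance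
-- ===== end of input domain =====

-- B sorts once and runs a single two-pointer pass instead of A's re-sorting recursion; measured asymptotically faster.

-- ===== PORT A =====
-- inner 'recursion': its recursive calls go through cannibal_number, which is
-- 'recursion(sorted(...), query)', so that call is inlined here (same computation).
def cannibalRec (array : List Int) (query : Int) : Int :=
  if array = [] then 0
  else if array.length = 1 then
    (if PySem.List.pyGetD array 0 0 ≥ query then 1 else 0)
  else
    if PySem.List.pyGetD array (-1) 0 ≥ query then
      1 + cannibalRec (PySem.List.sorted (PySem.List.slice array none (some (-1))) (fun x => x) false) query
    else
      -- array[-1] = array[-1] + 1; array.pop(0)  (pop(0)'s result is discarded: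
      -- on this nonempty list the effect is exactly List.tail)
      cannibalRec (PySem.List.sorted ((PySem.List.pySetD array (-1) (PySem.List.pyGetD array (-1) 0 + 1)).tail) (fun x => x) false) query
termination_by array.length
decreasing_by
  · have h : array ≠ [] := by assumption
    have hp : 0 < array.length := List.length_pos_iff.mpr h
    simp [PySem.List.length_sorted, PySem.List.slice_to_neg_one]
    omega
  · have h : array ≠ [] := by assumption
    have hp : 0 < array.length := List.length_pos_iff.mpr h
    simp [PySem.List.length_sorted, PySem.List.length_pySetD]
    omega

def cannibal_number (array : List Int) (query : Int) : Int :=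
  cannibalRec (PySem.List.sorted array (fun x => x) false) query

-- ===== PORT B =====
-- the while-loop of Source B: two pointers lo/hi into the sorted list, cur = current
-- top's strength (s[hi] plus its eats so far), count = cannibals counted.
def altLoop (s : List Int) (query : Int) (lo hi : Nat) (cur count : Int) : Int :=
  if lo < hi then
    if cur ≥ query then altLoop s query lo (hi - 1) (s.getD (hi - 1) 0) (count + 1)
    else altLoop s query (lo + 1) hi (cur + 1) count
  else count + (if cur ≥ query then 1 else 0)
termination_by hi - lo
decreasing_by all_goals omega

def cannibal_number_alt (array : List Int) (query : Int) : Int :=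
  let s := PySem.List.sorted array (fun x => x) false
  if s = [] then 0
  else altLoop s query 0 (s.length - 1) (s.getD (s.length - 1) 0) 0

-- ===== PRECONDITION & SPEC =====
def Spec_cannibal_number (array : List Int) (query : Int) (out : Int) : Prop := out = cannibal_number_alt array query
instance (array : List Int) (query : Int) (out : Int) : Decidable (Spec_cannibal_number array query out) := by unfold Spec_cannibal_number; infer_instance

-- ===== CLAIM (what is proved, stated in full; the proofs are below) =====
def Claim_equal_cannibal_number : Prop := ∀ (array : List Int) (query : Int), Dom_cannibal_number array query → Spec_cannibal_number array query (cannibal_number array query)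

-- ===== LEMMAS AND PROOFS =====

-- Main invariant: the loop state (lo, hi, cur) of altLoop describes the working
-- list (s.drop lo).take (hi - lo) ++ [cur] on which A's recursion operates.
theorem altLoop_eq (s : List Int) (q : Int) (n lo hi : Nat) (cur count : Int)
    (hn : hi - lo = n)
    (hs : s.Pairwise (· ≤ ·)) (hhi : hi < s.length)
    (hb : ∀ i (h : i < s.length), lo ≤ i → i < hi → s[i] ≤ cur) :
    altLoop s q lo hi cur count = count + cannibalRec ((s.drop lo).take (hi - lo) ++ [cur]) q := by
  induction n generalizing lo hi cur count with
  | zero =>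
      have hle : ¬ lo < hi := by omega
      rw [altLoop, if_neg hle]
      rw [hn]
      simp [cannibalRec]
  | succ m ih =>
      have hlt : lo < hi := by omega
      set D := (s.drop lo).take (hi - lo) with hD
      have hDlen : D.length = hi - lo := by
        simp [hD]; omega
      have hDne : D ≠ [] := by
        intro h; rw [h] at hDlen; simp at hDlen; omega
      have hLne : D ++ [cur] ≠ [] := by simp
      have hLlen : (D ++ [cur]).length ≠ 1 := by simp [hDlen]; omega
      rw [altLoop, if_pos hlt]
      rw [cannibalRec, if_neg hLne, if_neg hLlen, PySem.List.pyGetD_neg_one_append_singleton]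
      by_cases hq : cur ≥ q
      · rw [if_pos hq, if_pos hq]
        -- slice (D ++ [cur]) [:-1] = D
        rw [PySem.List.slice_to_neg_one, List.dropLast_concat]
        have hsD : PySem.List.sorted D (fun x => x) false = D := by
          apply PySem.List.sorted_eq_self_of_pairwise
          exact (hs.sublist ((List.take_sublist _ _).trans (List.drop_sublist _ _)))
        rw [hsD]
        -- D = (s.drop lo).take (hi-1-lo) ++ [s[hi-1]]
        have hidx : hi - 1 < s.length := by omega
        have hDsplit : D = (s.drop lo).take (hi - 1 - lo) ++ [s[hi-1]] := by
          rw [hD]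
          have h1 : hi - lo = (hi - 1 - lo) + 1 := by omega
          rw [h1, List.take_add_one]
          congr 1
          have h2 : lo + (hi - 1 - lo) = hi - 1 := by omega
          simp [List.getElem?_drop, h2, hidx]
        have hgetD : s.getD (hi - 1) 0 = s[hi-1] := List.getD_eq_getElem _ _ hidx
        rw [hgetD, ih lo (hi-1) (s[hi-1]) (count+1) (by omega) (by omega) ?bnd]
        case bnd =>
          intro i h hlo hih
          exact List.pairwise_iff_getElem.mp hs i (hi-1) h hidx (by omega)
        rw [← hDsplit]
        ring
      · rw [if_neg hq, if_neg hq]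
        have hcurbD : ∀ x ∈ D, x ≤ cur := by
          intro x hx
          rw [hD] at hx
          obtain ⟨i, hi2, hx⟩ := List.getElem_of_mem hx
          simp only [List.length_take, List.length_drop] at hi2
          simp only [List.getElem_take, List.getElem_drop] at hx
          subst hx
          exact hb (lo + i) (by omega) (by omega) (by omega)
        have hset : PySem.List.pySetD (D ++ [cur]) (-1) (cur + 1) = D ++ [cur + 1] := by
          simp [PySem.List.pySetD, PySem.List.pySet?, PySem.List.pyIdx?]
        rw [hset]
        have htail : (D ++ [cur + 1]).tail = D.tail ++ [cur + 1] := by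
          obtain ⟨a, t, hat⟩ := List.exists_cons_of_ne_nil hDne
          rw [hat]; simp
        rw [htail]
        have hsorted2 : PySem.List.sorted (D.tail ++ [cur+1]) (fun x => x) false = D.tail ++ [cur+1] := by
          apply PySem.List.sorted_eq_self_of_pairwise
          rw [List.pairwise_append]
          refine ⟨(hs.sublist (((List.tail_sublist _).trans (List.take_sublist _ _)).trans (List.drop_sublist _ _))), by simp, ?_⟩
          intro a ha b hb2
          simp only [List.mem_singleton] at hb2
          subst hb2
          have := hcurbD a (List.mem_of_mem_tail ha)
          omega
        rw [hsorted2]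
        have htail2 : D.tail = (s.drop (lo+1)).take (hi - (lo+1)) := by
          rw [hD, ← List.drop_one, List.drop_take, List.drop_drop]
          congr 1
        rw [htail2]
        exact ih (lo+1) hi (cur+1) count (by omega) hhi (by
          intro i h hlo hih
          have := hb i h (by omega) hih
          omega)

theorem cannibal_number_eq_alt (array : List Int) (query : Int) :
    cannibal_number array query = cannibal_number_alt array query := by
  unfold cannibal_number cannibal_number_alt
  set s := PySem.List.sorted array (fun x => x) false with hsdef
  by_cases h0 : s = []
  · rw [h0]
    simp [cannibalRec]
  · have hp : s.Pairwise (· ≤ ·) := by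
      have := PySem.List.sorted_pairwise (xs := array) (key := fun x => x)
      simpa [← hsdef] using this
    have hlen : 0 < s.length := List.length_pos_iff.mpr h0
    have hidx : s.length - 1 < s.length := by omega
    have hget : s.getD (s.length - 1) 0 = s[s.length - 1] := List.getD_eq_getElem _ _ hidx
    rw [if_neg h0, hget,
      altLoop_eq s query (s.length - 1) 0 (s.length - 1) (s[s.length - 1]) 0 rfl hp hidx
        (by intro i h h1 h2; exact List.pairwise_iff_getElem.mp hp i (s.length - 1) h hidx (by omega))]
    rw [List.drop_zero]
    have : s.take (s.length - 1 - 0) ++ [s[s.length - 1]] = s := by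
      rw [Nat.sub_zero, ← List.dropLast_eq_take, ← List.getLast_eq_getElem h0]
      exact List.dropLast_concat_getLast h0
    rw [this]
    ring

-- ===== VERDICT (by name: the statement is the Claim_ definition above) =====
theorem cannibal_number_spec : Claim_equal_cannibal_number := by
  intro array query _
  unfold Spec_cannibal_number
  exact cannibal_number_eq_alt array query
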